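-- pv_equiv track=rewrite | github.com/Vivekyadv/InterviewBit | Bit Manipulation/Bit play/4. diff bits sum pairwise.py | diffBits
-- ===== SOURCE A (Python) =====
-- def diffBits(arr, n):
--     ans = 0
--     mod = 10**9 + 7
--     for i in range(32):
--         count = 0
--         for j in range(n):
--             if arr[j] & 1<<i:
--                 count += 1
--         ans += count * (n-count)*2
--     return ans % mod
-- ===== SOURCE B (Python) =====
-- def diffBits(arr, n):
--     mod = 10**9 + 7
--     vals = [arr[j] for j in range(n)]
--     ans = 0
--     while vals:
--         x = vals.pop(0)
--         for y in vals:
--             ans += bin((x ^ y) & 0xFFFFFFFF).count('1')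
--     return (2 * ans) % mod
-- ===== Notes on version B (the rewrite author's own statement) =====
-- stated objective: alternative
-- what changed: Replaces A's 32 per-bit-position counting passes (count*(n-count)*2 per bit) with a head-consuming loop over unordered index pairs that sums each pair's 32-bit Hamming distance popcount((x^y)&0xFFFFFFFF) once and doubles the total at the end.
import Mathlib
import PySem

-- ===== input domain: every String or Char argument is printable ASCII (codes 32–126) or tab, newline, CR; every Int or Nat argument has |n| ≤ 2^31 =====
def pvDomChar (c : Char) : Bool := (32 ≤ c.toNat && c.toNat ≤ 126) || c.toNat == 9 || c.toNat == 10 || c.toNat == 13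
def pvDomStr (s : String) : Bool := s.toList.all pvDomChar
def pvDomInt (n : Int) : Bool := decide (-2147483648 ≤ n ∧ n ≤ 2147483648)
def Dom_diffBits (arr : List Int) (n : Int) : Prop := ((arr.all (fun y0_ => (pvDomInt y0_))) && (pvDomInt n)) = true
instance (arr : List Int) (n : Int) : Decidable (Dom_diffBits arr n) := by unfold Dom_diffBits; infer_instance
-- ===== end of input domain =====

-- B replaces A's 32 per-bit counting passes with a head-consuming loop over unordered pairs,
-- summing each pair's 32-bit Hamming distance once and doubling at the end (alternative
-- decomposition, same results; not claimed faster).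

-- ===== PORT A =====
def diffBits (arr : List Int) (n : Int) : Int :=
  let mod : Int := 10 ^ 9 + 7
  let ans : Int :=
    (PySem.List.pyRange 0 32 1).foldl (fun ans i =>
      let count : Int :=
        (PySem.List.pyRange 0 n 1).foldl (fun count j =>
          -- 'if arr[j] & 1<<i:' — truthiness of the int is ≠ 0; 1<<i is 1 <<< i.toNat (i ≥ 0 in range(32))
          if PySem.Int.band (PySem.List.pyGetD arr j 0) (1 <<< i.toNat) ≠ 0 then count + 1 else count) 0
      ans + count * (n - count) * 2) 0
  PySem.Int.mod ans mod

-- ===== PORT B =====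
/-- `bin((x ^ y) & 0xFFFFFFFF).count('1')` — the 32-bit Hamming distance of one pair. -/
def hamB (x y : Int) : Int :=
  (PySem.Int.bitCount (PySem.Int.band (PySem.Int.bxor x y) 4294967295) : Int)

/-- The `while vals:` loop — pop the front element `x`, add `hamB x y` for every remaining `y`. -/
def pairLoop : List Int → Int → Int
  | [], ans => ans
  | x :: rest, ans => pairLoop rest (rest.foldl (fun a y => a + hamB x y) ans)

def diffBits_alt (arr : List Int) (n : Int) : Int :=
  let mod : Int := 10 ^ 9 + 7
  let vals : List Int := (PySem.List.pyRange 0 n 1).map (fun j => PySem.List.pyGetD arr j 0)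
  PySem.Int.mod (2 * pairLoop vals 0) mod

-- ===== PRECONDITION & SPEC =====
-- Pre_ excludes exactly the inputs where both Pythons raise IndexError (an index in range(n) beyond len(arr)).
def Pre_diffBits (arr : List Int) (n : Int) : Prop := n ≤ (arr.length : Int)
instance (arr : List Int) (n : Int) : Decidable (Pre_diffBits arr n) := by unfold Pre_diffBits; infer_instance
def pvWitness_diffBits : List Int × Int := ([1, 2, 3], 3)
def Spec_diffBits (arr : List Int) (n : Int) (out : Int) : Prop := out = diffBits_alt arr n
instance (arr : List Int) (n : Int) (out : Int) : Decidable (Spec_diffBits arr n out) := by unfold Spec_diffBits; infer_instance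

-- ===== CLAIM (what is proved, stated in full; the proofs are below) =====
def Claim_equal_diffBits : Prop := ∀ (arr : List Int) (n : Int), Dom_diffBits arr n → Pre_diffBits arr n → Spec_diffBits arr n (diffBits arr n)

-- ===== LEMMAS AND PROOFS =====

/-- The Python bit test `v & 1<<k != 0` as a Bool, in two's-complement form. -/
def ibit (v : Int) (k : Nat) : Bool := if 0 ≤ v then v.toNat.testBit k else !((-v - 1).toNat.testBit k)

theorem shl_one (k : Nat) : (1 : Int) <<< k = ((2 ^ k : Nat) : Int) := by
  have h : (1 : Int) <<< k = ((1 <<< k : Nat) : Int) := rfl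
  rw [h, Nat.shiftLeft_eq, one_mul]

/-- A's test `v & 1<<k != 0` is the bit `ibit v k`. -/
theorem band_shl_ne_zero (v : Int) (k : Nat) :
    (PySem.Int.band v ((1 : Int) <<< k) ≠ 0) ↔ ibit v k = true := by
  rw [shl_one]
  unfold PySem.Int.band ibit
  by_cases hv : 0 ≤ v
  · rw [if_pos hv, if_pos (by positivity), if_pos hv]
    rw [Int.toNat_natCast, Nat.and_two_pow]
    cases h : v.toNat.testBit k <;> simp
  · rw [if_neg hv, if_pos (by positivity), if_neg hv]
    rw [Int.toNat_natCast, Nat.two_pow_and]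
    cases h : ((-v - 1).toNat.testBit k) <;> simp

/-- Complement-within-width: bits of (2^i - 1) - v for v < 2^i. -/
theorem compl_testBit : ∀ (i : Nat) (v : Nat), v < 2 ^ i →
    ∀ k, (2 ^ i - 1 - v).testBit k = (decide (k < i) && !(v.testBit k)) := by
  intro i
  induction i with
  | zero =>
    intro v hv k
    have : v = 0 := by omega
    subst this
    simp [Nat.zero_testBit]
  | succ i ih =>
    intro v hv k
    have hpow : 2 ^ (i + 1) = 2 * 2 ^ i := by ring
    have hv2 : v / 2 < 2 ^ i := by omega
    have hdecomp : 2 ^ (i + 1) - 1 - v = 2 * (2 ^ i - 1 - v / 2) + (1 - v % 2) := by omega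
    cases k with
    | zero =>
      rw [hdecomp, Nat.testBit_zero, Nat.testBit_zero]
      rcases Nat.mod_two_eq_zero_or_one v with h | h <;>
        simp [Nat.mul_add_mod, h]
    | succ k =>
      rw [hdecomp, Nat.testBit_add_one, Nat.testBit_add_one]
      have hdiv : (2 * (2 ^ i - 1 - v / 2) + (1 - v % 2)) / 2 = 2 ^ i - 1 - v / 2 := by omega
      rw [hdiv, ih (v / 2) hv2 k]
      simp [Nat.succ_lt_succ_iff]

theorem band_mask_nonneg (z : Int) : 0 ≤ PySem.Int.band z 4294967295 := by
  unfold PySem.Int.band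
  by_cases hz : 0 ≤ z <;> simp [hz]

theorem band_mask_lt (z : Int) : (PySem.Int.band z 4294967295).toNat < 2 ^ 32 := by
  unfold PySem.Int.band
  by_cases hz : 0 ≤ z
  · rw [if_pos hz, if_pos (by norm_num)]
    have h1 : z.toNat &&& (4294967295 : Int).toNat ≤ (4294967295 : Int).toNat := Nat.and_le_right
    have h2 : ((4294967295 : Int).toNat) = 4294967295 := rfl
    rw [Int.toNat_natCast]
    omega
  · rw [if_neg hz, if_pos (by norm_num)]
    rw [Int.toNat_natCast]
    have h2 : ((4294967295 : Int).toNat) = 4294967295 := rfl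
    omega

/-- Bits 0..31 of `z & 0xFFFFFFFF` are the bits of z. -/
theorem band_mask_testBit (z : Int) (k : Nat) (hk : k < 32) :
    ((PySem.Int.band z 4294967295).toNat).testBit k = ibit z k := by
  have hM : ((4294967295 : Int).toNat) = 2 ^ 32 - 1 := rfl
  unfold PySem.Int.band ibit
  by_cases hz : 0 ≤ z
  · rw [if_pos hz, if_pos (by norm_num), if_pos hz]
    rw [Int.toNat_natCast, Nat.testBit_and, hM, Nat.testBit_two_pow_sub_one]
    simp [hk]
  · rw [if_neg hz, if_pos (by norm_num), if_neg hz]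
    rw [Int.toNat_natCast, hM]
    have hmod : (2 ^ 32 - 1) &&& (-z - 1).toNat = (-z - 1).toNat % 2 ^ 32 := by
      rw [Nat.and_comm, Nat.and_two_pow_sub_one_eq_mod]
    rw [hmod, compl_testBit 32 ((-z - 1).toNat % 2 ^ 32) (Nat.mod_lt _ (by norm_num)) k,
      Nat.testBit_mod_two_pow]
    simp [hk]

/-- XOR acts bitwise on `ibit`. -/
theorem ibit_bxor (x y : Int) (k : Nat) : ibit (PySem.Int.bxor x y) k = (ibit x k != ibit y k) := by
  unfold PySem.Int.bxor ibit
  by_cases hx : 0 ≤ x <;> by_cases hy : 0 ≤ y <;> simp only [hx, hy, if_pos, if_neg, if_true, if_false]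
  · rw [if_pos (by positivity), Int.toNat_natCast, Nat.testBit_xor]
  · have hneg : ¬ (0 : Int) ≤ -(↑(x.toNat ^^^ (-y - 1).toNat) : Int) - 1 := by
      have : (0 : Int) ≤ ↑(x.toNat ^^^ (-y - 1).toNat) := by positivity
      omega
    rw [if_neg hneg]
    have harg : (-(-(↑(x.toNat ^^^ (-y - 1).toNat) : Int) - 1) - 1) = ↑(x.toNat ^^^ (-y - 1).toNat) := by ring
    rw [harg, Int.toNat_natCast, Nat.testBit_xor]
    cases x.toNat.testBit k <;> cases (-y - 1).toNat.testBit k <;> rfl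
  · have hneg : ¬ (0 : Int) ≤ -(↑((-x - 1).toNat ^^^ y.toNat) : Int) - 1 := by
      have : (0 : Int) ≤ ↑((-x - 1).toNat ^^^ y.toNat) := by positivity
      omega
    rw [if_neg hneg]
    have harg : (-(-(↑((-x - 1).toNat ^^^ y.toNat) : Int) - 1) - 1) = ↑((-x - 1).toNat ^^^ y.toNat) := by ring
    rw [harg, Int.toNat_natCast, Nat.testBit_xor]
    cases (-x - 1).toNat.testBit k <;> cases y.toNat.testBit k <;> rfl
  · rw [if_pos (by positivity), Int.toNat_natCast, Nat.testBit_xor]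
    cases (-x - 1).toNat.testBit k <;> cases (-y - 1).toNat.testBit k <;> rfl

/-- bit_count of a small natural is the number of set bits below K. -/
theorem bitCount_eq_countP : ∀ (K : Nat) (m : Nat), m < 2 ^ K →
    PySem.Int.bitCount (m : Int) = (List.range K).countP (fun k => m.testBit k) := by
  intro K
  induction K with
  | zero =>
    intro m hm
    have : m = 0 := by omega
    subst this
    simp
  | succ K ih =>
    intro m hm
    by_cases hm0 : m = 0
    · subst hm0
      simp [Nat.zero_testBit]
    · rw [PySem.Int.bitCount_natCast (Nat.pos_of_ne_zero hm0)]
      have hpow : 2 ^ (K + 1) = 2 * 2 ^ K := by ring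
      rw [ih (m / 2) (by omega)]
      rw [List.range_succ_eq_map, List.countP_cons, List.countP_map]
      have hcong : (List.range K).countP ((fun k => m.testBit k) ∘ (fun k => k + 1))
          = (List.range K).countP (fun k => (m / 2).testBit k) := by
        apply List.countP_congr
        intro a _
        simp [Function.comp, Nat.testBit_add_one]
      rw [hcong, Nat.testBit_zero]
      rcases Nat.mod_two_eq_zero_or_one m with h | h <;> simp [h] <;> omega

/-- Pointwise: the masked-xor popcount is the number of differing bits below 32. -/
theorem hamming_eq (x y : Int) :
    hamB x y = ((List.range 32).countP (fun k => ibit x k != ibit y k) : Int) := by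
  unfold hamB
  have h0 : PySem.Int.band (PySem.Int.bxor x y) 4294967295
      = (((PySem.Int.band (PySem.Int.bxor x y) 4294967295).toNat : Nat) : Int) :=
    (Int.toNat_of_nonneg (band_mask_nonneg _)).symm
  rw [h0, bitCount_eq_countP 32 _ (band_mask_lt _)]
  congr 1
  apply List.countP_congr
  intro k hk
  rw [band_mask_testBit _ k (List.mem_range.mp hk), ibit_bxor]

theorem hamB_comm (x y : Int) : hamB x y = hamB y x := by
  rw [hamming_eq, hamming_eq]
  congr 1
  apply List.countP_congr
  intro k _
  cases ibit x k <;> cases ibit y k <;> rfl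

theorem hamB_self (x : Int) : hamB x x = 0 := by
  rw [hamming_eq]
  rw [List.countP_eq_zero.mpr (by intro k _; simp)]
  rfl

/-- Exchange the order of a double list sum. -/
theorem sum_swap {α β : Type} (l : List α) (r : List β) (f : α → β → Int) :
    (l.map (fun x => (r.map (fun k => f x k)).sum)).sum
      = (r.map (fun k => (l.map (fun x => f x k)).sum)).sum := by
  induction l with
  | nil =>
    induction r with
    | nil => simp
    | cons b r ihr => simpa using ihr
  | cons a l ih =>
    simp only [List.map_cons, List.sum_cons, ih, PySem.List.sum_map_add_int]

theorem countP_bne_true (p : Int → Bool) (l : List Int) :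
    l.countP (fun y => p y != true) + l.countP p = l.length := by
  induction l with
  | nil => rfl
  | cons a l ih =>
    rw [List.countP_cons, List.countP_cons]
    cases h : p a
    · rw [if_pos (by simp [h]), if_neg (by simp [h])]
      simp only [List.length_cons]
      omega
    · rw [if_neg (by simp [h]), if_pos (by simp [h])]
      simp only [List.length_cons]
      omega

theorem sum_map_ite (p : Int → Bool) (A B : Int) (l : List Int) :
    (l.map (fun x => if p x then A else B)).sum
      = (l.countP p : Int) * A + ((l.length : Int) - l.countP p) * B := by
  induction l with
  | nil => simp
  | cons a l ih =>
    cases h : p a <;> simp [List.countP_cons, h, ih] <;> push_cast <;> ring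

/-- Double counting for one bit position. -/
theorem pair_count (p : Int → Bool) (l : List Int) :
    (l.map (fun x => ((l.countP (fun y => p y != p x) : Int)))).sum
      = (l.countP p : Int) * ((l.length : Int) - l.countP p) * 2 := by
  have hsum := countP_bne_true p l
  have hmap : (l.map (fun x => ((l.countP (fun y => p y != p x) : Int))))
      = l.map (fun x => if p x then ((l.countP (fun y => p y != true) : Nat) : Int) else (l.countP p : Int)) := by
    apply List.map_congr_left
    intro x _
    cases h : p x
    · rw [if_neg (by simp [h])]
      congr 1
      apply List.countP_congr
      intro y _
      simp [h]
    · rw [if_pos rfl]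
  rw [hmap, sum_map_ite]
  have hrw : ((l.countP (fun y => p y != true) : Int)) = (l.length : Int) - (l.countP p : Int) := by
    omega
  rw [hrw]
  ring

/-- Core identity: A's per-bit totals sum to the full ordered-pair Hamming sum. -/
theorem core_identity (l : List Int) :
    ((List.range 32).map (fun k =>
        (l.countP (fun v => ibit v k) : Int) * ((l.length : Int) - (l.countP (fun v => ibit v k) : Int)) * 2)).sum
      = (l.map (fun x => (l.map (fun y => hamB x y)).sum)).sum := by
  have step1 : (l.map (fun x => (l.map (fun y => hamB x y)).sum)).sum
      = (l.map (fun x => (l.map (fun y =>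
        ((List.range 32).map (fun k => if (ibit x k != ibit y k) then (1 : Int) else 0)).sum)).sum)).sum := by
    apply congrArg
    apply List.map_congr_left
    intro x _
    apply congrArg
    apply List.map_congr_left
    intro y _
    rw [hamming_eq]
    rw [PySem.List.sum_map_ite_one_zero]
  rw [step1]
  have step2 : (l.map (fun x => (l.map (fun y =>
        ((List.range 32).map (fun k => if (ibit x k != ibit y k) then (1 : Int) else 0)).sum)).sum)).sum
      = ((List.range 32).map (fun k => (l.map (fun x => (l.map (fun y =>
          if (ibit x k != ibit y k) then (1 : Int) else 0)).sum)).sum)).sum := by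
    have h1 : ∀ x : Int, (l.map (fun y => ((List.range 32).map (fun k => if (ibit x k != ibit y k) then (1 : Int) else 0)).sum)).sum
        = ((List.range 32).map (fun k => (l.map (fun y => if (ibit x k != ibit y k) then (1 : Int) else 0)).sum)).sum :=
      fun x => sum_swap l (List.range 32) (fun y k => if (ibit x k != ibit y k) then (1 : Int) else 0)
    rw [List.map_congr_left (fun x _ => h1 x)]
    exact sum_swap l (List.range 32) (fun x k => (l.map (fun y => if (ibit x k != ibit y k) then (1 : Int) else 0)).sum)
  rw [step2]
  apply congrArg
  apply List.map_congr_left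
  intro k _
  have inner : ∀ x : Int, (l.map (fun y => if (ibit x k != ibit y k) then (1 : Int) else 0)).sum
      = ((l.countP (fun y => ibit y k != ibit x k) : Int)) := by
    intro x
    have hflip : (l.map (fun y => if (ibit x k != ibit y k) then (1 : Int) else 0))
        = (l.map (fun y => if (ibit y k != ibit x k) then (1 : Int) else 0)) := by
      apply List.map_congr_left
      intro y _
      cases ibit x k <;> cases ibit y k <;> rfl
    rw [hflip]
    exact PySem.List.sum_map_ite_one_zero _ _
  rw [List.map_congr_left (fun x _ => inner x)]
  exact (pair_count (fun v => ibit v k) l).symm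

theorem pairLoop_acc : ∀ (l : List Int) (a : Int), pairLoop l a = a + pairLoop l 0 := by
  intro l
  induction l with
  | nil => intro a; simp [pairLoop]
  | cons x rest ih =>
    intro a
    show pairLoop rest (rest.foldl (fun a y => a + hamB x y) a)
        = a + pairLoop rest (rest.foldl (fun a y => a + hamB x y) 0)
    rw [ih, ih (rest.foldl (fun a y => a + hamB x y) 0), PySem.List.foldl_add,
      PySem.List.foldl_add, zero_add]
    ring

/-- The full ordered-pair Hamming sum is twice B's pop-loop result. -/
theorem ordered_eq_two_pairLoop : ∀ (l : List Int),
    (l.map (fun x => (l.map (fun y => hamB x y)).sum)).sum = 2 * pairLoop l 0 := by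
  intro l
  induction l with
  | nil => simp [pairLoop]
  | cons x rest ih =>
    show hamB x x + (rest.map (fun y => hamB x y)).sum
        + (rest.map (fun z => hamB z x + (rest.map (fun y => hamB z y)).sum)).sum
      = 2 * pairLoop rest (rest.foldl (fun a y => a + hamB x y) 0)
    rw [hamB_self, zero_add, pairLoop_acc, PySem.List.foldl_add, zero_add]
    have hsplit : (rest.map (fun z => hamB z x + (rest.map (fun y => hamB z y)).sum)).sum
        = (rest.map (fun z => hamB z x)).sum
          + (rest.map (fun z => (rest.map (fun y => hamB z y)).sum)).sum :=
      PySem.List.sum_map_add_int rest _ _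
    rw [hsplit, ih]
    have hcomm : (rest.map (fun z => hamB z x)).sum = (rest.map (fun y => hamB x y)).sum := by
      apply congrArg
      exact List.map_congr_left (fun z _ => hamB_comm z x)
    rw [hcomm]
    ring

/-- A's inner loop: the number of indices below n whose array value has bit i set. -/
def cntA (arr : List Int) (n : Int) (i : Int) : Int :=
  ((PySem.List.pyRange 0 n 1).countP
    (fun j => decide (PySem.Int.band (PySem.List.pyGetD arr j 0) (1 <<< i.toNat) ≠ 0)) : Int)

theorem A_eval (arr : List Int) (n : Int) :
    diffBits arr n = PySem.Int.mod
      (((PySem.List.pyRange 0 32 1).map (fun i => cntA arr n i * (n - cntA arr n i) * 2)).sum)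
      (10 ^ 9 + 7) := by
  show PySem.Int.mod
      ((PySem.List.pyRange 0 32 1).foldl (fun ans i =>
        ans + ((PySem.List.pyRange 0 n 1).foldl (fun count j =>
            if PySem.Int.band (PySem.List.pyGetD arr j 0) (1 <<< i.toNat) ≠ 0 then count + 1 else count) 0)
          * (n - ((PySem.List.pyRange 0 n 1).foldl (fun count j =>
            if PySem.Int.band (PySem.List.pyGetD arr j 0) (1 <<< i.toNat) ≠ 0 then count + 1 else count) 0)) * 2) 0)
      (10 ^ 9 + 7) = _
  congr 1
  rw [PySem.List.foldl_congr_mem (PySem.List.pyRange 0 32 1) _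
      (fun ans i => ans + cntA arr n i * (n - cntA arr n i) * 2) 0 ?hc]
  case hc =>
    intro acc i _
    unfold cntA
    rw [PySem.List.foldl_ite_add_one
      (fun j => PySem.Int.band (PySem.List.pyGetD arr j 0) (1 <<< i.toNat) ≠ 0), zero_add]
  rw [PySem.List.foldl_add, zero_add]

theorem cntA_eq (arr : List Int) (n : Int) (k : Nat) :
    cntA arr n (k : Int)
      = (((PySem.List.pyRange 0 n 1).map (fun j => PySem.List.pyGetD arr j 0)).countP
          (fun v => ibit v k) : Int) := by
  unfold cntA
  rw [List.countP_map]
  congr 1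
  apply List.countP_congr
  intro j _
  simpa using band_shl_ne_zero (PySem.List.pyGetD arr j 0) k

theorem AB_eq (arr : List Int) (n : Int) : diffBits arr n = diffBits_alt arr n := by
  rw [A_eval]
  show _ = PySem.Int.mod
      (2 * pairLoop ((PySem.List.pyRange 0 n 1).map (fun j => PySem.List.pyGetD arr j 0)) 0)
      (10 ^ 9 + 7)
  congr 1
  set l := (PySem.List.pyRange 0 n 1).map (fun j => PySem.List.pyGetD arr j 0) with hl
  by_cases hn : n ≤ 0
  · rw [hl, PySem.List.pyRange_one_eq_nil hn]
    simp [cntA, pairLoop, PySem.List.pyRange_one_eq_nil hn]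
  · have hlen : ((l.length : Nat) : Int) = n := by
      rw [hl, List.length_map, PySem.List.length_pyRange_one]
      omega
    calc ((PySem.List.pyRange 0 32 1).map (fun i => cntA arr n i * (n - cntA arr n i) * 2)).sum
        = ((List.range 32).map (fun k =>
            (l.countP (fun v => ibit v k) : Int)
            * ((l.length : Int) - (l.countP (fun v => ibit v k) : Int)) * 2)).sum := by
          rw [show (32 : Int) = ((32 : Nat) : Int) from rfl, PySem.List.pyRange_zero_nat, List.map_map]
          apply congrArg
          apply List.map_congr_left
          intro k _
          show cntA arr n (k : Int) * (n - cntA arr n (k : Int)) * 2 = _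
          rw [cntA_eq, ← hl, hlen]
      _ = (l.map (fun x => (l.map (fun y => hamB x y)).sum)).sum := core_identity l
      _ = 2 * pairLoop l 0 := ordered_eq_two_pairLoop l

-- ===== VERDICT (by name: the statement is the Claim_ definition above) =====
theorem diffBits_spec : Claim_equal_diffBits := by
  intro arr n _hdom _hpre
  unfold Spec_diffBits
  exact AB_eq arr n
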